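-- pv_equiv track=rewrite | github.com/ingann/DSA-course | forbidden.py | count
-- ===== SOURCE A (Python) =====
-- def count(s):
--
--
--     result = 0
--     count = 0
--
--     n = len(s)
--
--     total_substrings = n*(n+1)//2
--
--     for i in range(n):
--         if s[i] == "a":
--             result += ((count+1)*(n-i))
--             count = 0
--         else:
--             count += 1
--     return total_substrings-result
-- ===== SOURCE B (Python) =====
-- def count(s):
--     result = 0
--     run = 0
--     for c in s:
--         if c == "a":
--             result += run * (run + 1) // 2
--             run = 0
--         else:
--             run += 1
--     return result + run * (run + 1) // 2
-- ===== Notes on version B (the rewrite author's own statement) =====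
-- stated objective: simpler
-- what changed: Instead of A's complement scheme (total substring count minus a per-'a' contribution (count+1)*(n-i)), B directly sums the triangular number run*(run+1)//2 over maximal runs of non-'a' characters.
import Mathlib
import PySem

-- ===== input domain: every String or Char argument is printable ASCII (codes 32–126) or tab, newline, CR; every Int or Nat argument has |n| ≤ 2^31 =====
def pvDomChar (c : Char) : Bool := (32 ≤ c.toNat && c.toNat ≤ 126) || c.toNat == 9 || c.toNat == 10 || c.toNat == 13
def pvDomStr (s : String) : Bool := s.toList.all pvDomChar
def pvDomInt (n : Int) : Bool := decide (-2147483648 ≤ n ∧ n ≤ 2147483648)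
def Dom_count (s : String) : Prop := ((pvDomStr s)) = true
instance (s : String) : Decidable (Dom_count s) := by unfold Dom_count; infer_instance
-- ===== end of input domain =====

-- B replaces A's complement scheme (total substrings minus per-'a' contributions) by directly
-- summing run*(run+1)//2 over maximal runs of non-'a' characters; objective: simpler.

-- ===== PORT A =====
-- A's loop over i in range(n): state (result, count); n - i is the length of the suffix
-- starting at position i, i.e. t.length + 1 when the remaining characters are c :: t.
def countA_go : List Char → Int → Int → Int
  | [], result, _ => result
  | c :: t, result, cnt =>
      if c = 'a' then countA_go t (result + (cnt + 1) * ((t.length : Int) + 1)) 0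
      else countA_go t result (cnt + 1)

def count (s : String) : Int :=
  let n : Int := (s.toList.length : Int)
  let total := PySem.Int.floordiv (n * (n + 1)) 2
  total - countA_go s.toList 0 0

-- ===== PORT B =====
def countB_go : List Char → Int → Int → Int
  | [], result, run => result + PySem.Int.floordiv (run * (run + 1)) 2
  | c :: t, result, run =>
      if c = 'a' then countB_go t (result + PySem.Int.floordiv (run * (run + 1)) 2) 0
      else countB_go t result (run + 1)

def count_alt (s : String) : Int := countB_go s.toList 0 0

-- ===== PRECONDITION & SPEC =====
def Spec_count (s : String) (out : Int) : Prop := out = count_alt s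
instance (s : String) (out : Int) : Decidable (Spec_count s out) := by unfold Spec_count; infer_instance

-- ===== CLAIM (what is proved, stated in full; the proofs are below) =====
def Claim_equal_count : Prop := ∀ (s : String), Dom_count s → Spec_count s (count s)

-- ===== LEMMAS AND PROOFS =====

def tri (n : Int) : Int := PySem.Int.floordiv (n * (n + 1)) 2

theorem two_tri (n : Int) : 2 * tri n = n * (n + 1) := by
  have hdvd : (2 : Int) ∣ n * (n + 1) := (Int.even_mul_succ_self n).two_dvd
  unfold tri
  rw [PySem.Int.floordiv_eq_ediv_of_pos (by norm_num)]
  omega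

theorem countA_go_res (l : List Char) : ∀ res cnt,
    countA_go l res cnt = res + countA_go l 0 cnt := by
  induction l with
  | nil => intro res cnt; simp [countA_go]
  | cons c t ih =>
      intro res cnt
      by_cases hc : c = 'a'
      · simp only [countA_go, if_pos hc]
        conv_lhs => rw [ih]
        conv_rhs => rw [ih]
        ring
      · simp only [countA_go, if_neg hc]
        exact ih res (cnt + 1)

theorem countB_go_res (l : List Char) : ∀ res run,
    countB_go l res run = res + countB_go l 0 run := by
  induction l with
  | nil => intro res run; simp [countB_go]
  | cons c t ih =>
      intro res run
      by_cases hc : c = 'a'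
      · simp only [countB_go, if_pos hc]
        conv_lhs => rw [ih]
        conv_rhs => rw [ih]
        ring
      · simp only [countB_go, if_neg hc]
        exact ih res (run + 1)

theorem main_inv (l : List Char) : ∀ cnt : Int,
    countA_go l 0 cnt + countB_go l 0 cnt = tri ((l.length : Int) + cnt) := by
  induction l with
  | nil =>
      intro cnt
      simp [countA_go, countB_go, tri]
  | cons c t ih =>
      intro cnt
      by_cases hc : c = 'a'
      · simp only [countA_go, countB_go, if_pos hc, List.length_cons]
        rw [countA_go_res t _ 0, countB_go_res t _ 0]
        have h := ih 0
        have hTc : PySem.Int.floordiv (cnt * (cnt + 1)) 2 = tri cnt := rfl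
        rw [hTc]
        have h1 := two_tri ((t.length : Int) + 0)
        have h2 := two_tri cnt
        have h3 := two_tri ((t.length : Int) + 1 + cnt)
        push_cast at *
        nlinarith [h, h1, h2, h3]
      · simp only [countA_go, countB_go, if_neg hc, List.length_cons]
        have h := ih (cnt + 1)
        rw [show ((t.length : Int) + (cnt + 1)) = (t.length : Int) + 1 + cnt by ring] at h
        push_cast at *
        linarith [h]

-- ===== VERDICT (by name: the statement is the Claim_ definition above) =====
theorem count_spec : Claim_equal_count := by
  unfold Claim_equal_count
  intro s _
  unfold Spec_count count count_alt
  have h := main_inv s.toList 0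
  simp only [add_zero] at h
  show (tri ((s.toList.length : Int))) - countA_go s.toList 0 0 = countB_go s.toList 0 0
  omega
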